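-- pv_equiv track=rewrite | github.com/rakovpublic/CCDR | research_program/computations/prediction_tests/v7/ccdr_v73_public_tests_t13_t17/test15_p36_highz_a0_trend.py | _score_cols
-- ===== SOURCE A (Python) =====
-- from typing import Dict, List, Optional
--
-- def _score_cols(cols: List[str]) -> int:
--     u = {c.upper() for c in cols}
--     score = 0
--     for k in ["Z", "FIELD", "ID"]:
--         if k in u:
--             score += 5
--     for k in ["LMSTAR", "MSTAR", "LOGMSTAR", "MASS"]:
--         if k in u:
--             score += 5
--     for k in ["RHALF", "RE", "RE_KPC", "R_E", "RADIUS", "AP_RADIUS"]: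
--         if k in u:
--             score += 4
--     for k in ["VROT", "VCIRC", "VMAX", "SIG", "SIGMA"]:
--         if k in u:
--             score += 3
--     for k in ["FLUX_HA", "SFR"]:
--         if k in u:
--             score += 1
--     return score
-- ===== SOURCE B (Python) =====
-- WEIGHTS = {
--     "Z": 5, "FIELD": 5, "ID": 5,
--     "LMSTAR": 5, "MSTAR": 5, "LOGMSTAR": 5, "MASS": 5,
--     "RHALF": 4, "RE": 4, "RE_KPC": 4, "R_E": 4, "RADIUS": 4, "AP_RADIUS": 4,
--     "VROT": 3, "VCIRC": 3, "VMAX": 3, "SIG": 3, "SIGMA": 3,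
--     "FLUX_HA": 1, "SFR": 1,
-- }
--
-- def _score_cols(cols):
--     seen = set()
--     score = 0
--     for c in cols:
--         cu = c.upper()
--         if cu not in seen:
--             seen.add(cu)
--             score += WEIGHTS.get(cu, 0)
--     return score
-- ===== Notes on version B (the rewrite author's own statement) =====
-- stated objective: simpler
-- what changed: Replaces five fixed key-list loops testing membership in the set of uppercased columns by a single pass over the columns that deduplicates as it goes and sums each new column's weight from one weight table.
import Mathlib
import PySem

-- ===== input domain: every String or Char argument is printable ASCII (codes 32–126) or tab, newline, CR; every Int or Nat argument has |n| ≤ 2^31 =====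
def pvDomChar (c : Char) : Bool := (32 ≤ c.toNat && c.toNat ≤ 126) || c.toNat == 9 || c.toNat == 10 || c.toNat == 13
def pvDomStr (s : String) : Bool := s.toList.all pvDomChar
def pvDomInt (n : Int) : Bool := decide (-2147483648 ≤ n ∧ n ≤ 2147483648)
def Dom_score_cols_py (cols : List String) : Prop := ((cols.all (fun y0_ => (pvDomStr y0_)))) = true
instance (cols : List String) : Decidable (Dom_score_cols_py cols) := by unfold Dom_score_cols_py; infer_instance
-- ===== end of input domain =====

-- B replaces A's five fixed key-list loops by one deduplicating pass over the columns with a single weight table (objective: simpler).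

-- ===== PORT A =====
def score_cols_py (cols : List String) : Int :=
  let u : PySem.Set String := PySem.Set.ofList (cols.map (fun c => PySem.Str.upper c))
  let score : Int := 0
  let score := ["Z", "FIELD", "ID"].foldl
    (fun sc k => if PySem.Set.contains u k then sc + 5 else sc) score
  let score := ["LMSTAR", "MSTAR", "LOGMSTAR", "MASS"].foldl
    (fun sc k => if PySem.Set.contains u k then sc + 5 else sc) score
  let score := ["RHALF", "RE", "RE_KPC", "R_E", "RADIUS", "AP_RADIUS"].foldl
    (fun sc k => if PySem.Set.contains u k then sc + 4 else sc) score
  let score := ["VROT", "VCIRC", "VMAX", "SIG", "SIGMA"].foldl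
    (fun sc k => if PySem.Set.contains u k then sc + 3 else sc) score
  let score := ["FLUX_HA", "SFR"].foldl
    (fun sc k => if PySem.Set.contains u k then sc + 1 else sc) score
  score

-- ===== PORT B =====
def pvWeights : PySem.Dict String Int := PySem.Dict.ofList
  [("Z", 5), ("FIELD", 5), ("ID", 5),
   ("LMSTAR", 5), ("MSTAR", 5), ("LOGMSTAR", 5), ("MASS", 5),
   ("RHALF", 4), ("RE", 4), ("RE_KPC", 4), ("R_E", 4), ("RADIUS", 4), ("AP_RADIUS", 4),
   ("VROT", 3), ("VCIRC", 3), ("VMAX", 3), ("SIG", 3), ("SIGMA", 3),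
   ("FLUX_HA", 1), ("SFR", 1)]

def score_cols_py_alt (cols : List String) : Int :=
  (cols.foldl
    (fun (st : PySem.Set String × Int) c =>
      let cu := PySem.Str.upper c
      if PySem.Set.contains st.1 cu then st
      else (PySem.Set.add st.1 cu, st.2 + PySem.Dict.getD pvWeights cu 0))
    (PySem.Set.empty, 0)).2

-- ===== PRECONDITION & SPEC =====
def Spec_score_cols_py (cols : List String) (out : Int) : Prop := out = score_cols_py_alt cols
instance (cols : List String) (out : Int) : Decidable (Spec_score_cols_py cols out) := by unfold Spec_score_cols_py; infer_instance

-- ===== CLAIM (what is proved, stated in full; the proofs are below) =====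
def Claim_equal_score_cols_py : Prop := ∀ (cols : List String), Dom_score_cols_py cols → Spec_score_cols_py cols (score_cols_py cols)

-- ===== LEMMAS AND PROOFS =====

-- A's total score as a function of the set of uppercased columns.
def pvAf (u : PySem.Set String) : Int :=
  let score : Int := 0
  let score := ["Z", "FIELD", "ID"].foldl
    (fun sc k => if PySem.Set.contains u k then sc + 5 else sc) score
  let score := ["LMSTAR", "MSTAR", "LOGMSTAR", "MASS"].foldl
    (fun sc k => if PySem.Set.contains u k then sc + 5 else sc) score
  let score := ["RHALF", "RE", "RE_KPC", "R_E", "RADIUS", "AP_RADIUS"].foldl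
    (fun sc k => if PySem.Set.contains u k then sc + 4 else sc) score
  let score := ["VROT", "VCIRC", "VMAX", "SIG", "SIGMA"].foldl
    (fun sc k => if PySem.Set.contains u k then sc + 3 else sc) score
  let score := ["FLUX_HA", "SFR"].foldl
    (fun sc k => if PySem.Set.contains u k then sc + 1 else sc) score
  score

theorem score_cols_py_eq_pvAf (cols : List String) :
    score_cols_py cols = pvAf (PySem.Set.ofList (cols.map (fun c => PySem.Str.upper c))) := rfl

-- a group loop is the start value plus the sum of the hit weights
theorem foldl_if_add (ks : List String) (u : PySem.Set String) (w sc : Int) :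
    ks.foldl (fun sc k => if PySem.Set.contains u k then sc + w else sc) sc
      = sc + (ks.map (fun k => if PySem.Set.contains u k then w else 0)).sum := by
  induction ks generalizing sc with
  | nil => simp
  | cons k ks ih =>
    simp only [List.foldl_cons, List.map_cons, List.sum_cons, ih]
    split <;> ring

-- adding a fresh element changes one membership test per key
theorem if_contains_add (seen : PySem.Set String) (cu k : String) (w : Int)
    (h : PySem.Set.contains seen cu = false) :
    (if PySem.Set.contains (PySem.Set.add seen cu) k then w else 0)
      = (if PySem.Set.contains seen k then w else 0) + (if cu = k then w else 0) := by
  have hmem : cu ∉ seen := fun hm => by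
    rw [(PySem.Set.contains_iff seen cu).mpr hm] at h; cases h
  by_cases hk : cu = k
  · subst hk
    simp [hmem]
  · have hor : (k ∈ seen ∨ k = cu) ↔ k ∈ seen := or_iff_left (fun e => hk e.symm)
    simp [PySem.Set.mem_add, hor, hk]

-- the weight table agrees with the 20 per-key indicator terms, summed in A's order
theorem getD_pvWeights (cu : String) :
    (if cu = "Z" then (5:Int) else 0) + (if cu = "FIELD" then 5 else 0) + (if cu = "ID" then 5 else 0)
    + ((if cu = "LMSTAR" then (5:Int) else 0) + (if cu = "MSTAR" then 5 else 0) + (if cu = "LOGMSTAR" then 5 else 0) + (if cu = "MASS" then 5 else 0))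
    + ((if cu = "RHALF" then (4:Int) else 0) + (if cu = "RE" then 4 else 0) + (if cu = "RE_KPC" then 4 else 0) + (if cu = "R_E" then 4 else 0) + (if cu = "RADIUS" then 4 else 0) + (if cu = "AP_RADIUS" then 4 else 0))
    + ((if cu = "VROT" then (3:Int) else 0) + (if cu = "VCIRC" then 3 else 0) + (if cu = "VMAX" then 3 else 0) + (if cu = "SIG" then 3 else 0) + (if cu = "SIGMA" then 3 else 0))
    + ((if cu = "FLUX_HA" then (1:Int) else 0) + (if cu = "SFR" then 1 else 0))
      = PySem.Dict.getD pvWeights cu 0 := by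
  by_cases h1 : cu = "Z"; · subst h1; decide
  by_cases h2 : cu = "FIELD"; · subst h2; decide
  by_cases h3 : cu = "ID"; · subst h3; decide
  by_cases h4 : cu = "LMSTAR"; · subst h4; decide
  by_cases h5 : cu = "MSTAR"; · subst h5; decide
  by_cases h6 : cu = "LOGMSTAR"; · subst h6; decide
  by_cases h7 : cu = "MASS"; · subst h7; decide
  by_cases h8 : cu = "RHALF"; · subst h8; decide
  by_cases h9 : cu = "RE"; · subst h9; decide
  by_cases h10 : cu = "RE_KPC"; · subst h10; decide
  by_cases h11 : cu = "R_E"; · subst h11; decide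
  by_cases h12 : cu = "RADIUS"; · subst h12; decide
  by_cases h13 : cu = "AP_RADIUS"; · subst h13; decide
  by_cases h14 : cu = "VROT"; · subst h14; decide
  by_cases h15 : cu = "VCIRC"; · subst h15; decide
  by_cases h16 : cu = "VMAX"; · subst h16; decide
  by_cases h17 : cu = "SIG"; · subst h17; decide
  by_cases h18 : cu = "SIGMA"; · subst h18; decide
  by_cases h19 : cu = "FLUX_HA"; · subst h19; decide
  by_cases h20 : cu = "SFR"; · subst h20; decide
  have hmk : pvWeights = PySem.Dict.mk
      [("Z", 5), ("FIELD", 5), ("ID", 5), ("LMSTAR", 5), ("MSTAR", 5), ("LOGMSTAR", 5),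
       ("MASS", 5), ("RHALF", 4), ("RE", 4), ("RE_KPC", 4), ("R_E", 4), ("RADIUS", 4),
       ("AP_RADIUS", 4), ("VROT", 3), ("VCIRC", 3), ("VMAX", 3), ("SIG", 3), ("SIGMA", 3),
       ("FLUX_HA", 1), ("SFR", 1)] := by decide
  simp [hmk, PySem.Dict.getD, beq_iff_eq,
    h1, h2, h3, h4, h5, h6, h7, h8, h9, h10, h11, h12, h13, h14, h15, h16, h17, h18, h19, h20,
    Ne.symm h1, Ne.symm h2, Ne.symm h3, Ne.symm h4, Ne.symm h5, Ne.symm h6, Ne.symm h7,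
    Ne.symm h8, Ne.symm h9, Ne.symm h10, Ne.symm h11, Ne.symm h12, Ne.symm h13, Ne.symm h14,
    Ne.symm h15, Ne.symm h16, Ne.symm h17, Ne.symm h18, Ne.symm h19, Ne.symm h20,
    PySem.Dict.get?]

-- the key step: adding a fresh uppercased column raises A's score by its table weight
theorem pvAf_add (seen : PySem.Set String) (cu : String)
    (h : PySem.Set.contains seen cu = false) :
    pvAf (PySem.Set.add seen cu) = pvAf seen + PySem.Dict.getD pvWeights cu 0 := by
  simp only [pvAf, foldl_if_add, List.map_cons, List.map_nil, List.sum_cons, List.sum_nil,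
    if_contains_add _ _ _ _ h]
  rw [← getD_pvWeights cu]
  ring

-- loop invariant for B's single pass
theorem alt_loop_inv (cols : List String) (seen : PySem.Set String) :
    cols.foldl
      (fun (st : PySem.Set String × Int) c =>
        let cu := PySem.Str.upper c
        if PySem.Set.contains st.1 cu then st
        else (PySem.Set.add st.1 cu, st.2 + PySem.Dict.getD pvWeights cu 0))
      (seen, pvAf seen)
    = (let seen' := (cols.map (fun c => PySem.Str.upper c)).foldl PySem.Set.add seen
       (seen', pvAf seen')) := by
  induction cols generalizing seen with
  | nil => simp
  | cons c cols ih =>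
    simp only [List.foldl_cons, List.map_cons]
    by_cases h : PySem.Set.contains seen (PySem.Str.upper c)
    · have hadd : PySem.Set.add seen (PySem.Str.upper c) = seen := by
        simp only [PySem.Set.add]
        split
        · rfl
        · exact absurd h (by assumption)
      simp only [h, if_true, hadd, ih]
    · have h' : PySem.Set.contains seen (PySem.Str.upper c) = false := by
        simpa using h
      simp only [h', if_false, Bool.false_eq_true, ← pvAf_add seen _ h', ih]

-- ===== VERDICT (by name: the statement is the Claim_ definition above) =====
theorem score_cols_py_spec : Claim_equal_score_cols_py := by
  intro cols _
  unfold Spec_score_cols_py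
  rw [score_cols_py_eq_pvAf]
  unfold score_cols_py_alt
  have h0 : pvAf PySem.Set.empty = 0 := by decide
  have := alt_loop_inv cols PySem.Set.empty
  rw [show ((PySem.Set.empty : PySem.Set String), (0:Int)) = (PySem.Set.empty, pvAf PySem.Set.empty) by rw [h0], this]
  simp [PySem.Set.ofList_eq_foldl]
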